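-- pv_equiv track=rewrite | github.com/Alessandro727/DreamAnalyzer | characters.py | removeSurnameAndDoubleCoding
-- ===== SOURCE A (Python) =====
-- def removeSurnameAndDoubleCoding(lista,array):
-- 	new_lista = []
-- 	if lista == []:
-- 		return lista
-- 	for x in range(len(lista)):
-- 		for y in range(len(array)):
-- 			if lista[x].split(' ')[0] == array[y]:
-- 				if x<len(lista)-1 and y<len(array)-1:
-- 					if lista[x+1].split(' ')[0] == array[y+1]:
-- 						new_lista.append(lista[x+1])
-- 	for k in new_lista:
-- 		if k in lista:
-- 			lista.remove(k)
-- 	return lista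
-- ===== SOURCE B (Python) =====
-- def removeSurnameAndDoubleCoding(lista, array):
-- 	if not lista:
-- 		return lista
-- 	pair_count = {}
-- 	for i in range(len(array) - 1):
-- 		p = (array[i], array[i + 1])
-- 		pair_count[p] = pair_count.get(p, 0) + 1
-- 	budget = {}
-- 	for x in range(len(lista) - 1):
-- 		p = (lista[x].split(' ')[0], lista[x + 1].split(' ')[0])
-- 		c = pair_count.get(p, 0)
-- 		if c != 0:
-- 			v = lista[x + 1]
-- 			budget[v] = budget.get(v, 0) + c
-- 	result = []
-- 	for v in lista:
-- 		b = budget.get(v, 0)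
-- 		if b > 0:
-- 			budget[v] = b - 1
-- 		else:
-- 			result.append(v)
-- 	lista[:] = result
-- 	return lista
-- ===== Notes on version B (the rewrite author's own statement) =====
-- stated objective: faster
-- what changed: Replaces A's nested index loops over lista×array plus a second pass of repeated list.remove scans by three linear dictionary passes: a counter of adjacent array pairs, a per-value removal budget summed in one pass over adjacent lista pairs, and a single forward filtering pass that skips the first budget[v] occurrences of each value (written back in place).
import Mathlib
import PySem

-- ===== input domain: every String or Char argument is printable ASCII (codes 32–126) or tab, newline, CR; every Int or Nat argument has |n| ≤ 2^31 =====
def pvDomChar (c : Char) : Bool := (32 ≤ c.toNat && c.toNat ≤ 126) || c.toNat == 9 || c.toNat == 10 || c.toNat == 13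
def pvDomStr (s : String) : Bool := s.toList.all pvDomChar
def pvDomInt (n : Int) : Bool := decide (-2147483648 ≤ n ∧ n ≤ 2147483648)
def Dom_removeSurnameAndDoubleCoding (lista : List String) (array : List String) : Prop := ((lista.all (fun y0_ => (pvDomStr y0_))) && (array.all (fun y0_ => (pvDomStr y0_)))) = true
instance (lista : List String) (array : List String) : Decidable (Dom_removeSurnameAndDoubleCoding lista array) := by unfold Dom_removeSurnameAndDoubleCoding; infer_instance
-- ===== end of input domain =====

-- B replaces A's quadruple scanning (nested index loops plus repeated list.remove) by three
-- linear dictionary passes: a pair counter, a per-value removal budget and one filtering pass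
-- (objective: faster). Both programs mutate `lista` in place to the same final contents; the
-- equivalence proved here is about the returned value.

-- ===== PORT A =====
-- s.split(' ')[0]  (split with an explicit separator never yields [], so index 0 is in range)
def pvFirstWord (s : String) : String :=
  PySem.List.pyGetD ((PySem.Str.split? s " ").getD []) 0 ""

def removeSurnameAndDoubleCoding (lista : List String) (array : List String) : List String :=
  if lista == [] then lista
  else
    let new_lista : List String :=
      (PySem.List.pyRange 0 (lista.length : Int) 1).foldl (fun nl x =>
        (PySem.List.pyRange 0 (array.length : Int) 1).foldl (fun nl y =>
          if pvFirstWord (PySem.List.pyGetD lista x "") == PySem.List.pyGetD array y "" then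
            if x < (lista.length : Int) - 1 ∧ y < (array.length : Int) - 1 then
              if pvFirstWord (PySem.List.pyGetD lista (x + 1) "") == PySem.List.pyGetD array (y + 1) "" then
                nl ++ [PySem.List.pyGetD lista (x + 1) ""]
              else nl
            else nl
          else nl) nl) []
    new_lista.foldl (fun l k => if k ∈ l then l.erase k else l) lista

-- ===== PORT B =====
def removeSurnameAndDoubleCoding_alt (lista : List String) (array : List String) : List String :=
  if lista == [] then lista
  else
    let pair_count : PySem.Dict (String × String) Int :=
      (PySem.List.pyRange 0 ((array.length : Int) - 1) 1).foldl (fun d i =>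
        let p := (PySem.List.pyGetD array i "", PySem.List.pyGetD array (i + 1) "")
        d.insert p (d.getD p 0 + 1)) PySem.Dict.empty
    let budget : PySem.Dict String Int :=
      (PySem.List.pyRange 0 ((lista.length : Int) - 1) 1).foldl (fun d x =>
        let p := (pvFirstWord (PySem.List.pyGetD lista x ""),
                  pvFirstWord (PySem.List.pyGetD lista (x + 1) ""))
        let c := pair_count.getD p 0
        if c ≠ 0 then
          let v := PySem.List.pyGetD lista (x + 1) ""
          d.insert v (d.getD v 0 + c)
        else d) PySem.Dict.empty
    let result := lista.foldl
      (fun (st : List String × PySem.Dict String Int) v =>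
        let b := st.2.getD v 0
        if b > 0 then (st.1, st.2.insert v (b - 1))
        else (st.1 ++ [v], st.2)) ([], budget)
    result.1

-- ===== PRECONDITION & SPEC =====
def Spec_removeSurnameAndDoubleCoding (lista : List String) (array : List String) (out : List String) : Prop := out = removeSurnameAndDoubleCoding_alt lista array
instance (lista : List String) (array : List String) (out : List String) : Decidable (Spec_removeSurnameAndDoubleCoding lista array out) := by unfold Spec_removeSurnameAndDoubleCoding; infer_instance

-- ===== CLAIM (what is proved, stated in full; the proofs are below) =====
def Claim_equal_removeSurnameAndDoubleCoding : Prop := ∀ (lista : List String) (array : List String), Dom_removeSurnameAndDoubleCoding lista array → Spec_removeSurnameAndDoubleCoding lista array (removeSurnameAndDoubleCoding lista array)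

-- ===== LEMMAS AND PROOFS =====

-- the pair of adjacent entries of `arr` at index k (out-of-range reads give "")
def pvPairAt (arr : List String) (k : Nat) : String × String :=
  (arr.getD k "", arr.getD (k + 1) "")

-- the multiplicity with which A's double loop appends lista[x+1]
def pvMul (lista arr : List String) (x : Nat) : Nat :=
  if x + 1 < lista.length then
    (arr.zip arr.tail).count (pvFirstWord (lista.getD x ""), pvFirstWord (lista.getD (x + 1) ""))
  else 0

-- budget-driven filtering, on a plain budget function
def pvFilterF : List String → (String → Int) → List String
  | [], _ => []
  | a :: t, f =>
    if f a > 0 then pvFilterF t (fun w => if w = a then f a - 1 else f w)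
    else a :: pvFilterF t f

theorem pvPairAt_range (arr : List String) :
    (List.range (arr.length - 1)).map (pvPairAt arr) = arr.zip arr.tail := by
  induction arr with
  | nil => simp
  | cons a t ih =>
    cases t with
    | nil => simp
    | cons b u =>
      have h : (a :: b :: u).length - 1 = (b :: u).length := by simp
      rw [h, List.length_cons, List.range_succ_eq_map]
      simp only [List.map_cons, List.map_map]
      have h2 : pvPairAt (a :: b :: u) ∘ Nat.succ = pvPairAt (b :: u) := by
        funext k; simp [pvPairAt]
      have h0 : pvPairAt (a :: b :: u) 0 = (a, b) := by simp [pvPairAt]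
      rw [h0, h2]
      have := ih
      simp only [List.length_cons, Nat.add_sub_cancel, List.tail_cons] at this
      rw [this]
      rfl

theorem pvCnt_range (arr : List String) (w0 w1 : String) :
    (List.range arr.length).countP
      (fun k => (w0 == arr.getD k "") && decide (k + 1 < arr.length) && (w1 == arr.getD (k + 1) ""))
      = (arr.zip arr.tail).count (w0, w1) := by
  rw [← pvPairAt_range, List.count_eq_countP, List.countP_map]
  cases hn : arr.length with
  | zero => simp [hn]
  | succ m =>
    simp only [Nat.add_sub_cancel]
    rw [List.range_succ, List.countP_append]
    have h2 : ([m].countP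
        (fun k => (w0 == arr.getD k "") && decide (k + 1 < m + 1) && (w1 == arr.getD (k + 1) ""))) = 0 := by
      simp
    rw [h2, Nat.add_zero]
    apply List.countP_congr
    intro k hk
    have hk' : k < m := List.mem_range.mp hk
    have hd : decide (k + 1 < m + 1) = true := by simp; omega
    have hb : ((pvPairAt arr k == (w0, w1)) : Bool)
        = ((arr.getD k "" == w0) && (arr.getD (k + 1) "" == w1)) := rfl
    simp only [Function.comp, hb, hd, Bool.and_true]
    rw [BEq.comm (a := w0), BEq.comm (a := w1)]

theorem pvFilterF_congr (l : List String) (f g : String → Int)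
    (h : ∀ v ∈ l, f v = g v) : pvFilterF l f = pvFilterF l g := by
  induction l generalizing f g with
  | nil => rfl
  | cons a t ih =>
    have ha : f a = g a := h a (by simp)
    simp only [pvFilterF, ha]
    split
    · exact ih _ _ (fun v hv => by by_cases hva : v = a <;> simp [hva, h v (by simp [hv])])
    · exact congrArg _ (ih _ _ (fun v hv => h v (by simp [hv])))

theorem pvFilterF_nonpos (l : List String) (f : String → Int)
    (h : ∀ v ∈ l, f v ≤ 0) : pvFilterF l f = l := by
  induction l generalizing f with
  | nil => rfl
  | cons a t ih =>
    have ha : ¬ f a > 0 := by have := h a (by simp); omega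
    simp only [pvFilterF, if_neg ha]
    exact congrArg _ (ih _ (fun v hv => h v (by simp [hv])))

theorem pvFilterF_erase (l : List String) (k : String) (f : String → Int)
    (hk : k ∈ l) (hf : 0 ≤ f k) :
    pvFilterF (l.erase k) f = pvFilterF l (fun w => if w = k then f k + 1 else f w) := by
  induction l generalizing f with
  | nil => simp at hk
  | cons a t ih =>
    by_cases hak : a = k
    · subst hak
      rw [List.erase_cons_head]
      have haa : (if a = a then f a + 1 else f a) = f a + 1 := if_pos rfl
      simp only [pvFilterF, haa, eq_self_iff_true, if_true]
      rw [if_pos (by omega : f a + 1 > 0)]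
      apply pvFilterF_congr
      intro v hv
      by_cases h : v = a <;> simp [h]
    · rw [List.erase_cons_tail (by simpa using hak)]
      have hkt : k ∈ t := by
        rcases List.mem_cons.mp hk with h | h
        · exact absurd (Eq.symm h) hak
        · exact h
      simp only [pvFilterF]
      rw [show (if a = k then f k + 1 else f a) = f a from if_neg hak]
      by_cases hfa : f a > 0
      · rw [if_pos hfa, if_pos hfa]
        have hf' : 0 ≤ (fun w => if w = a then f a - 1 else f w) k := by
          simp only [if_neg (fun h : k = a => hak (Eq.symm h))]; exact hf
        rw [ih _ hkt hf']
        apply pvFilterF_congr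
        intro v hv
        by_cases hva : v = a <;> by_cases hvk : v = k <;> simp_all
      · rw [if_neg hfa, if_neg hfa]
        exact congrArg _ (ih f hkt hf)

theorem pvRemove_eq_filter (ks l : List String) :
    ks.foldl (fun l k => if k ∈ l then l.erase k else l) l
      = pvFilterF l (fun v => (ks.count v : Int)) := by
  induction ks generalizing l with
  | nil =>
    simp only [List.foldl_nil, List.count_nil]
    exact (pvFilterF_nonpos l _ (fun v hv => by simp)).symm
  | cons k ks ih =>
    rw [List.foldl_cons, ih]
    by_cases hk : k ∈ l
    · rw [if_pos hk]
      rw [pvFilterF_erase _ k _ hk (by positivity)]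
      apply pvFilterF_congr
      intro v hv
      by_cases hvk : v = k
      · subst hvk; simp
      · have hkv : (k == v) = false := beq_eq_false_iff_ne.mpr (fun h => hvk (Eq.symm h))
        simp [List.count_cons, hkv, hvk]
    · rw [if_neg hk]
      apply pvFilterF_congr
      intro v hv
      have hvk : v ≠ k := fun h => hk (h ▸ hv)
      have hkv : (k == v) = false := beq_eq_false_iff_ne.mpr (fun h => hvk (Eq.symm h))
      simp [List.count_cons, hkv]

theorem pvPass_eq_filter (l : List String) (acc : List String) (d : PySem.Dict String Int) :
    (l.foldl (fun (st : List String × PySem.Dict String Int) v =>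
        let b := st.2.getD v 0
        if b > 0 then (st.1, st.2.insert v (b - 1))
        else (st.1 ++ [v], st.2)) (acc, d)).1
      = acc ++ pvFilterF l (fun v => d.getD v 0) := by
  induction l generalizing acc d with
  | nil => simp [pvFilterF]
  | cons a t ih =>
    simp only [List.foldl_cons]
    by_cases hb : d.getD a 0 > 0
    · rw [if_pos hb] at *
      show (t.foldl _ (acc, d.insert a (d.getD a 0 - 1))).1 = _
      rw [ih]
      simp only [pvFilterF, if_pos hb]
      congr 1
      apply pvFilterF_congr
      intro v hv
      by_cases hva : v = a
      · subst hva; rw [PySem.Dict.getD_insert_self]; simp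
      · rw [PySem.Dict.getD_insert_of_ne d _ 0 hva]; simp [hva]
    · rw [if_neg hb]
      show (t.foldl _ (acc ++ [a], d)).1 = _
      rw [ih]
      simp only [pvFilterF, if_neg hb, List.append_assoc, List.singleton_append]

theorem pvBudget_fold (xs : List (String × Int)) (d : PySem.Dict String Int) (v : String) :
    (xs.foldl (fun d kc =>
        if kc.2 ≠ 0 then d.insert kc.1 (d.getD kc.1 0 + kc.2) else d) d).getD v 0
      = d.getD v 0 + (xs.map (fun kc => if kc.1 = v then kc.2 else 0)).sum := by
  induction xs generalizing d with
  | nil => simp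
  | cons kc xs ih =>
    rw [List.foldl_cons, ih, List.map_cons, List.sum_cons]
    by_cases hc : kc.2 ≠ 0
    · rw [if_pos hc]
      by_cases hkv : kc.1 = v
      · rw [hkv, PySem.Dict.getD_insert_self, if_pos (rfl : v = v)]
        ring
      · rw [PySem.Dict.getD_insert_of_ne d _ 0 (fun h => hkv (Eq.symm h)), if_neg hkv]
        ring
    · rw [if_neg hc]
      have h0 : kc.2 = 0 := by omega
      rw [h0]
      simp

theorem pvRange_sub_one (n : Nat) :
    PySem.List.pyRange 0 ((n : Int) - 1) 1 = List.map (fun k => (Nat.cast k : Int)) (List.range (n - 1)) := by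
  cases n with
  | zero => rw [PySem.List.pyRange_one_eq_nil (by omega)]; rfl
  | succ m =>
    have h : ((m + 1 : Nat) : Int) - 1 = (m : Int) := by push_cast; ring
    rw [h, PySem.List.pyRange_zero_natCast]
    rfl

theorem pvPairCount_eq (arr : List String) (p : String × String) :
    ((PySem.List.pyRange 0 ((arr.length : Int) - 1) 1).foldl (fun d i =>
        let q := (PySem.List.pyGetD arr i "", PySem.List.pyGetD arr (i + 1) "")
        d.insert q (d.getD q 0 + 1)) (PySem.Dict.empty : PySem.Dict (String × String) Int)).getD p 0
      = ((arr.zip arr.tail).count p : Int) := by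
  rw [pvRange_sub_one, List.foldl_map]
  simp only [← Nat.cast_add_one, PySem.List.pyGetD_natCast]
  rw [show (List.foldl
          (fun (x : PySem.Dict (String × String) Int) y => x.insert (arr.getD y "", arr.getD (y + 1) "") (x.getD (arr.getD y "", arr.getD (y + 1) "") 0 + 1))
          PySem.Dict.empty (List.range (arr.length - 1)))
      = (((List.range (arr.length - 1)).map (fun k => (arr.getD k "", arr.getD (k + 1) ""))).foldl
          (fun (d : PySem.Dict (String × String) Int) q => d.insert q (d.getD q 0 + 1)) PySem.Dict.empty)
    from by rw [List.foldl_map]]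
  rw [show (fun (k : Nat) => (arr.getD k "", arr.getD (k + 1) "")) = pvPairAt arr from rfl, pvPairAt_range]
  rw [PySem.Dict.getD_foldl_insert_add_one]
  simp

theorem pvInner_eq (lista arr : List String) (k : Nat) (nl : List String) :
    (PySem.List.pyRange 0 (arr.length : Int) 1).foldl (fun nl y =>
        if pvFirstWord (PySem.List.pyGetD lista (Nat.cast k) "") == PySem.List.pyGetD arr y "" then
          if (Nat.cast k : Int) < (lista.length : Int) - 1 ∧ y < (arr.length : Int) - 1 then
            if pvFirstWord (PySem.List.pyGetD lista ((Nat.cast k : Int) + 1) "") == PySem.List.pyGetD arr (y + 1) "" then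
              nl ++ [PySem.List.pyGetD lista ((Nat.cast k : Int) + 1) ""]
            else nl
          else nl
        else nl) nl
      = nl ++ List.replicate (pvMul lista arr k) (lista.getD (k + 1) "") := by
  rw [PySem.List.pyRange_zero_natCast, List.foldl_map]
  simp only [← Nat.cast_add_one, PySem.List.pyGetD_natCast]
  have hcongr := PySem.List.foldl_congr_mem
    (l := List.range arr.length) (init := nl)
    (f := fun (x : List String) (y : Nat) =>
        if (pvFirstWord (lista.getD k "") == arr.getD y "") = true then
          if (Nat.cast k : Int) < (lista.length : Int) - 1 ∧ (Nat.cast y : Int) < (arr.length : Int) - 1 then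
            if (pvFirstWord (lista.getD (k + 1) "") == arr.getD (y + 1) "") = true then x ++ [lista.getD (k + 1) ""]
            else x
          else x
        else x)
    (g := fun (x : List String) (y : Nat) =>
      if (pvFirstWord (lista.getD k "") == arr.getD y "")
          && decide (k + 1 < lista.length) && decide (y + 1 < arr.length)
          && (pvFirstWord (lista.getD (k + 1) "") == arr.getD (y + 1) "") then
        x ++ [lista.getD (k + 1) ""]
      else x)
    (fun nl j _ => by
      dsimp only
      by_cases h1 : pvFirstWord (lista.getD k "") == arr.getD j ""
      · rw [if_pos h1]
        by_cases h2 : (Nat.cast k : Int) < (lista.length : Int) - 1 ∧ (Nat.cast j : Int) < (arr.length : Int) - 1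
        · have h2a : k + 1 < lista.length := by omega
          have h2b : j + 1 < arr.length := by omega
          have h1' : pvFirstWord (lista.getD k "") = arr.getD j "" := by simpa using h1
          simp only [List.getD_eq_getElem?_getD] at h1'
          simp [h2a, h2b, h2, h1']
        · have hn : ¬ (k + 1 < lista.length ∧ j + 1 < arr.length) := by
            intro hc; exact h2 ⟨by omega, by omega⟩
          rw [if_neg h2]
          rcases Decidable.not_and_iff_or_not.mp hn with hc | hc <;> simp [hc]
      · rw [if_neg h1]
        have h1' : ¬ pvFirstWord (lista.getD k "") = arr.getD j "" := by simpa using h1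
        simp only [List.getD_eq_getElem?_getD] at h1'
        simp [h1'])
  rw [hcongr]
  rw [PySem.List.foldl_append_if]
  congr 1
  rw [List.map_const']
  congr 1
  rw [← List.countP_eq_length_filter]
  by_cases hk : k + 1 < lista.length
  · rw [show pvMul lista arr k
        = (arr.zip arr.tail).count (pvFirstWord (lista.getD k ""), pvFirstWord (lista.getD (k + 1) ""))
      from if_pos hk]
    rw [← pvCnt_range]
    apply List.countP_congr
    intro j hj
    simp [hk]
  · rw [show pvMul lista arr k = 0 from if_neg hk]
    rw [List.countP_eq_zero]
    intro j hj
    simp [hk]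

theorem pvNewA_eq (lista arr : List String) :
    ((PySem.List.pyRange 0 (lista.length : Int) 1).foldl (fun nl x =>
        (PySem.List.pyRange 0 (arr.length : Int) 1).foldl (fun nl y =>
          if pvFirstWord (PySem.List.pyGetD lista x "") == PySem.List.pyGetD arr y "" then
            if x < (lista.length : Int) - 1 ∧ y < (arr.length : Int) - 1 then
              if pvFirstWord (PySem.List.pyGetD lista (x + 1) "") == PySem.List.pyGetD arr (y + 1) "" then
                nl ++ [PySem.List.pyGetD lista (x + 1) ""]
              else nl
            else nl
          else nl) nl) ([] : List String))
    = (List.range lista.length).flatMap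
        (fun x => List.replicate (pvMul lista arr x) (lista.getD (x + 1) "")) := by
  rw [PySem.List.pyRange_zero_natCast lista.length, List.foldl_map]
  rw [PySem.List.foldl_congr_mem (l := List.range lista.length) (init := ([] : List String))
    (f := fun (nl : List String) (k : Nat) =>
      (PySem.List.pyRange 0 (arr.length : Int) 1).foldl (fun nl y =>
        if pvFirstWord (PySem.List.pyGetD lista (Nat.cast k) "") == PySem.List.pyGetD arr y "" then
          if (Nat.cast k : Int) < (lista.length : Int) - 1 ∧ y < (arr.length : Int) - 1 then
            if pvFirstWord (PySem.List.pyGetD lista ((Nat.cast k : Int) + 1) "") == PySem.List.pyGetD arr (y + 1) "" then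
              nl ++ [PySem.List.pyGetD lista ((Nat.cast k : Int) + 1) ""]
            else nl
          else nl
        else nl) nl)
    (g := fun (nl : List String) (k : Nat) =>
      nl ++ List.replicate (pvMul lista arr k) (lista.getD (k + 1) ""))
    (fun nl k _ => pvInner_eq lista arr k nl)]
  rw [PySem.List.foldl_append_eq_flatMap]
  rfl

theorem pvBudget_eq_count (lista arr : List String) (v : String) :
    ((PySem.List.pyRange 0 ((lista.length : Int) - 1) 1).foldl (fun d x =>
        let p := (pvFirstWord (PySem.List.pyGetD lista x ""),
                  pvFirstWord (PySem.List.pyGetD lista (x + 1) ""))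
        let c := ((arr.zip arr.tail).count p : Int)
        if c ≠ 0 then
          let w := PySem.List.pyGetD lista (x + 1) ""
          d.insert w (d.getD w 0 + c)
        else d) (PySem.Dict.empty : PySem.Dict String Int)).getD v 0
      = (((List.range lista.length).flatMap
            (fun x => List.replicate (pvMul lista arr x) (lista.getD (x + 1) ""))).count v : Int) := by
  rw [pvRange_sub_one, List.foldl_map]
  simp only [← Nat.cast_add_one, PySem.List.pyGetD_natCast]
  rw [show (List.foldl (fun (d : PySem.Dict String Int) (k : Nat) =>
        let p := (pvFirstWord (lista.getD k ""), pvFirstWord (lista.getD (k + 1) ""))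
        let c := ((arr.zip arr.tail).count p : Int)
        if c ≠ 0 then
          let w := lista.getD (k + 1) ""
          d.insert w (d.getD w 0 + c)
        else d) PySem.Dict.empty (List.range (lista.length - 1)))
      = (((List.range (lista.length - 1)).map (fun k => (lista.getD (k + 1) "",
            ((arr.zip arr.tail).count (pvFirstWord (lista.getD k ""), pvFirstWord (lista.getD (k + 1) "")) : Int)))).foldl
          (fun (d : PySem.Dict String Int) kc =>
            if kc.2 ≠ 0 then d.insert kc.1 (d.getD kc.1 0 + kc.2) else d) PySem.Dict.empty)
    from by rw [List.foldl_map]]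
  rw [pvBudget_fold, List.map_map]
  rw [List.count_flatMap]
  cases hn : lista.length with
  | zero =>
    simp [hn]
  | succ m =>
    rw [List.range_succ, List.map_append, List.sum_append]
    have hmul : pvMul lista arr m = 0 := by rw [pvMul, if_neg (by omega)]
    rw [show ([m].map (List.count v ∘ fun x => List.replicate (pvMul lista arr x) (lista.getD (x + 1) ""))).sum
        = 0 from by simp [hmul]]
    simp only [Nat.add_sub_cancel]
    rw [show (PySem.Dict.empty : PySem.Dict String Int).getD v 0 = 0 from rfl, zero_add, Nat.add_zero]
    push_cast
    rw [List.map_map]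
    apply congrArg List.sum
    apply List.map_congr_left
    intro k hk
    have hk' : k < m := List.mem_range.mp hk
    have hkl : k + 1 < lista.length := by omega
    simp only [Function.comp, List.count_replicate, pvMul, if_pos hkl]
    by_cases hv : lista.getD (k + 1) "" = v
    · simp [hv]
    · simp [beq_eq_false_iff_ne.mpr hv]

-- ===== VERDICT (by name: the statement is the Claim_ definition above) =====
theorem removeSurnameAndDoubleCoding_spec : Claim_equal_removeSurnameAndDoubleCoding := by
  intro lista array _
  unfold Spec_removeSurnameAndDoubleCoding removeSurnameAndDoubleCoding removeSurnameAndDoubleCoding_alt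
  by_cases hl : (lista == []) = true
  · rw [if_pos hl, if_pos hl]
  · rw [if_neg hl, if_neg hl]
    dsimp only
    rw [pvNewA_eq lista array, pvRemove_eq_filter]
    rw [pvPass_eq_filter, List.nil_append]
    apply pvFilterF_congr
    intro v hv
    rw [show (fun (d : PySem.Dict (String × String) Int) (i : Int) =>
          d.insert (PySem.List.pyGetD array i "", PySem.List.pyGetD array (i + 1) "")
            (d.getD (PySem.List.pyGetD array i "", PySem.List.pyGetD array (i + 1) "") 0 + 1))
        = (fun (d : PySem.Dict (String × String) Int) (i : Int) =>
          let q := (PySem.List.pyGetD array i "", PySem.List.pyGetD array (i + 1) "")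
          d.insert q (d.getD q 0 + 1)) from rfl]
    simp only [pvPairCount_eq]
    rw [pvBudget_eq_count]
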